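-- pv_equiv track=rewrite | github.com/eholmquist01/CPSC507_Midterm3 | Midterm3.py | occurs_n_times
-- ===== SOURCE A (Python) =====
-- def occurs_n_times(list, n):
--     #initialize a dictionary to store new values and counts
--     dict = {}
--     #for loop to go through each element in list
--     for value in list:
--         #if the element is not in the list, add it to dict with count 1
--        if value not in dict:
--            dict[value] = 1
--         #if the element is in the dict, increment the count by 1
--        elif value in dict:
--            dict[value] += 1
--         #check if the incremented count is at n yet. if it is, we found an element including at least n times. return true
--        if dict[value] == n:
--             return True
--     #if we make it through the whole list without finding n times elements, then return false
--     return False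
-- ===== SOURCE B (Python) =====
-- def occurs_n_times(list, n):
--     # sort-based: after sorting, equal elements are contiguous, so some
--     # element occurs at least n times iff some window of width n has equal
--     # endpoints; n < 1 can never be hit by a positive occurrence count
--     if n < 1:
--         return False
--     s = sorted(list)
--     return any(s[i] == s[i + n - 1] for i in range(len(s) - n + 1))
-- ===== Notes on version B (the rewrite author's own statement) =====
-- stated objective: alternative
-- what changed: Replaced A's hash-count loop (a dict of running counts with an early return when a count hits n) by a sort-based algorithm with no counting structure at all: sort the list, then check whether any window of width n has equal endpoints, which in a sorted list happens exactly when some element has multiplicity at least n; the n >= 1 guard reflects that A's == n test never fires for non-positive n.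
import Mathlib
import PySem

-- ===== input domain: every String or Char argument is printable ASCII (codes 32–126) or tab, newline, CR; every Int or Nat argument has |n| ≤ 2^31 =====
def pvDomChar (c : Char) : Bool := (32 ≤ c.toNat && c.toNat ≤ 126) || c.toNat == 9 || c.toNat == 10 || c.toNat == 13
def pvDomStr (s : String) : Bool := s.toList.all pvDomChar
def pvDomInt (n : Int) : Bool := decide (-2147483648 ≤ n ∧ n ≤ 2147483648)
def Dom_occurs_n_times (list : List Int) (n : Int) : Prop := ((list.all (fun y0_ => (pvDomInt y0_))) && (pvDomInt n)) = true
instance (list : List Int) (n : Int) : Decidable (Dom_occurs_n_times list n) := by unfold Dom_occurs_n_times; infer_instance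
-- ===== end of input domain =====

-- B replaces A's dict of running counts with a sort-based algorithm (sort, then
-- test windows of width n for equal endpoints); objective: alternative.


-- ===== PORT A =====
-- the for-loop of A, carrying the mutable dict; returns True as soon as a count hits n
def occursLoopA (n : Int) : List Int → PySem.Dict Int Int → Bool
  | [], _ => false
  | value :: rest, d =>
    let d' := if ¬ d.contains value then d.insert value 1
              else if d.contains value then d.modify value 0 (· + 1) else d
    if d'.getD value 0 = n then true else occursLoopA n rest d'

def occurs_n_times (list : List Int) (n : Int) : Bool :=
  occursLoopA n list PySem.Dict.empty

-- ===== PORT B =====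
-- every index the generator produces is in range (0 ≤ i and i + n - 1 < len s),
-- so pyGetD is exact for Python's s[i] here
def occurs_n_times_alt (list : List Int) (n : Int) : Bool :=
  if n < 1 then false
  else
    let s := PySem.List.sorted list id false
    (PySem.List.pyRange 0 ((s.length : Int) - n + 1) 1).any
      (fun i => PySem.List.pyGetD s i 0 == PySem.List.pyGetD s (i + n - 1) 0)

-- ===== PRECONDITION & SPEC =====
def Spec_occurs_n_times (list : List Int) (n : Int) (out : Bool) : Prop := out = occurs_n_times_alt list n
instance (list : List Int) (n : Int) (out : Bool) : Decidable (Spec_occurs_n_times list n out) := by unfold Spec_occurs_n_times; infer_instance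

-- ===== CLAIM =====
def Claim_equal_occurs_n_times : Prop := ∀ (list : List Int) (n : Int), Dom_occurs_n_times list n → Spec_occurs_n_times list n (occurs_n_times list n)

-- ===== LEMMAS AND PROOFS =====

-- loop characterisation: A's loop returns true iff some element of the remaining
-- list can push its running count (start value d.getD v 0) up to exactly n
lemma occursLoopA_true_iff (n : Int) (rest : List Int) (d : PySem.Dict Int Int) :
    occursLoopA n rest d = true ↔
      ∃ v ∈ rest, d.getD v 0 < n ∧ n ≤ d.getD v 0 + (rest.count v : Int) := by
  induction rest generalizing d with
  | nil => simp [occursLoopA]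
  | cons value t ih =>
    set d' := (if ¬ d.contains value then d.insert value 1
               else if d.contains value then d.modify value 0 (· + 1) else d) with hd'
    have hstep : ∀ w : Int,
        d'.getD w 0 = if w = value then d.getD value 0 + 1 else d.getD w 0 := by
      intro w
      rw [hd']
      by_cases hc : d.contains value
      · simp [hc, PySem.Dict.getD_modify]
      · have hcf : d.contains value = false := by simpa using hc
        have h0 : d.getD value 0 = 0 := PySem.Dict.getD_of_not_contains d 0 hcf
        simp [hc, PySem.Dict.getD_insert, h0]
    have hself : d'.getD value 0 = d.getD value 0 + 1 := by
      rw [hstep value]; simp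
    have hcnt : List.count value (value :: t) = List.count value t + 1 :=
      List.count_cons_self
    simp only [occursLoopA]
    rw [← hd']
    by_cases hhit : d'.getD value 0 = n
    · rw [hself] at hhit
      rw [hself, if_pos hhit]
      exact iff_of_true rfl
        ⟨value, List.mem_cons_self, by omega, by rw [hcnt]; push_cast; omega⟩
    · have hne : ¬ d'.getD value 0 = n := hhit
      rw [if_neg hne, ih]
      rw [hself] at hhit
      constructor
      · rintro ⟨w, hw, h1, h2⟩
        rw [hstep w] at h1 h2
        by_cases hwv : w = value
        · subst hwv
          rw [if_pos rfl] at h1 h2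
          exact ⟨w, List.mem_cons_self, by omega, by rw [hcnt]; push_cast; omega⟩
        · rw [if_neg hwv] at h1 h2
          refine ⟨w, List.mem_cons_of_mem _ hw, h1, ?_⟩
          rw [List.count_cons_of_ne (Ne.symm hwv)]
          exact h2
      · rintro ⟨w, hw, h1, h2⟩
        by_cases hwv : w = value
        · subst hwv
          rw [hcnt] at h2
          have hwt : w ∈ t := by
            by_contra hnot
            have h0 : t.count w = 0 := List.count_eq_zero.mpr hnot
            omega
          refine ⟨w, hwt, ?_, ?_⟩
          · rw [hstep w, if_pos rfl]; omega
          · rw [hstep w, if_pos rfl]; push_cast at h2 ⊢; omega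
        · have hwt : w ∈ t := by
            rcases List.mem_cons.mp hw with h | h
            · exact absurd h hwv
            · exact h
          rw [List.count_cons_of_ne (Ne.symm hwv)] at h2
          exact ⟨w, hwt, by rw [hstep w, if_neg hwv]; exact h1,
                 by rw [hstep w, if_neg hwv]; exact h2⟩

-- a sorted list is its <v, =v, >v filters in order
lemma sorted_filter_decomp (s : List Int) (hs : s.Pairwise (· ≤ ·)) (v : Int) :
    s = s.filter (fun x => decide (x < v)) ++
        (s.filter (fun x => decide (x = v)) ++ s.filter (fun x => decide (v < x))) := by
  have hz : ∀ (p : Int → Bool) (a : Int), p a = false → (s.filter p).count a = 0 := by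
    intro p a hp
    refine List.count_eq_zero.mpr (fun hm => ?_)
    rw [List.mem_filter] at hm
    rw [hp] at hm
    exact Bool.false_ne_true hm.2
  have hperm : (s.filter (fun x => decide (x < v)) ++
      (s.filter (fun x => decide (x = v)) ++ s.filter (fun x => decide (v < x)))).Perm s := by
    rw [List.perm_iff_count]
    intro a
    simp only [List.count_append]
    have c1 : (s.filter (fun x => decide (x < v))).count a =
        if a < v then s.count a else 0 := by
      split_ifs with h
      · exact List.count_filter (by simpa using h)
      · exact hz _ a (by simpa using h)
    have c2 : (s.filter (fun x => decide (x = v))).count a =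
        if a = v then s.count a else 0 := by
      split_ifs with h
      · exact List.count_filter (by simpa using h)
      · exact hz _ a (by simpa using h)
    have c3 : (s.filter (fun x => decide (v < x))).count a =
        if v < a then s.count a else 0 := by
      split_ifs with h
      · exact List.count_filter (by simpa using h)
      · exact hz _ a (by simpa using h)
    rw [c1, c2, c3]
    split_ifs <;> omega
  have hsorted : (s.filter (fun x => decide (x < v)) ++
      (s.filter (fun x => decide (x = v)) ++ s.filter (fun x => decide (v < x)))).Pairwise (· ≤ ·) := by
    rw [List.pairwise_append]
    refine ⟨hs.sublist List.filter_sublist, ?_, ?_⟩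
    · rw [List.pairwise_append]
      refine ⟨hs.sublist List.filter_sublist, hs.sublist List.filter_sublist, ?_⟩
      intro a ha b hb
      simp only [List.mem_filter, decide_eq_true_eq] at ha hb
      omega
    · intro a ha b hb
      simp only [List.mem_filter, List.mem_append, decide_eq_true_eq] at ha hb
      rcases hb with hb | hb <;> omega
  exact (List.Perm.eq_of_pairwise (fun a b _ _ u w => le_antisymm u w) hsorted hs hperm).symm

lemma getElem_idx_congr (l : List Int) (i j : Nat) (h : i = j) (hj : j < l.length) :
    l[i]'(h ▸ hj) = l[j] := by subst h; rfl

lemma sorted_window_iff (s : List Int) (hs : s.Pairwise (· ≤ ·)) (N : Nat) (hN : 1 ≤ N) :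
    (∃ i : Nat, ∃ h : i + N ≤ s.length,
        s[i]'(by omega) = s[i + N - 1]'(by omega)) ↔
      ∃ v ∈ s, N ≤ s.count v := by
  have hp := List.pairwise_iff_getElem.mp hs
  constructor
  · rintro ⟨i, h, heq⟩
    refine ⟨s[i]'(by omega), List.getElem_mem _, ?_⟩
    have hmid : ((s.drop i).take N).Sublist s :=
      (List.take_sublist _ _).trans (List.drop_sublist _ _)
    have hlen : ((s.drop i).take N).length = N := by
      simp [List.length_take, List.length_drop]; omega
    have hall : ∀ b ∈ (s.drop i).take N, s[i]'(by omega) = b := by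
      intro b hb
      obtain ⟨k, hk, rfl⟩ := List.mem_iff_getElem.mp hb
      rw [hlen] at hk
      have e1 : ((s.drop i).take N)[k] = s[i + k]'(by omega) := by
        rw [List.getElem_take, List.getElem_drop]
      rw [e1]
      have h1 : s[i]'(by omega) ≤ s[i + k]'(by omega) := by
        rcases Nat.eq_zero_or_pos k with hk0 | hk0
        · subst hk0; simp
        · exact hp i (i+k) (by omega) (by omega) (by omega)
      have h2 : s[i + k]'(by omega) ≤ s[i + N - 1]'(by omega) := by
        rcases Nat.lt_or_ge (i + k) (i + N - 1) with hlt | hge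
        · exact hp (i+k) (i+N-1) (by omega) (by omega) hlt
        · exact le_of_eq (getElem_idx_congr s _ _ (by omega) (by omega))
      exact le_antisymm h1 (heq ▸ h2)
    have hcm : ((s.drop i).take N).count (s[i]'(by omega)) = N := by
      rw [List.count_eq_length.mpr hall, hlen]
    calc N = ((s.drop i).take N).count (s[i]'(by omega)) := hcm.symm
      _ ≤ s.count _ := hmid.count_le _
  · rintro ⟨v, hv, hcnt⟩
    set A := s.filter (fun x => decide (x < v)) with hA
    set B := s.filter (fun x => decide (x = v)) with hB
    set C := s.filter (fun x => decide (v < x)) with hC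
    have hdec : s = A ++ (B ++ C) := sorted_filter_decomp s hs v
    have hallB : ∀ b ∈ B, v = b := by
      intro b hb
      rw [hB, List.mem_filter] at hb
      have := hb.2
      simp at this
      omega
    have hzA : A.count v = 0 := by
      refine List.count_eq_zero.mpr (fun hm => ?_)
      rw [hA, List.mem_filter] at hm
      simp at hm
    have hzC : C.count v = 0 := by
      refine List.count_eq_zero.mpr (fun hm => ?_)
      rw [hC, List.mem_filter] at hm
      simp at hm
    have hcvs : s.count v = B.length := by
      conv_lhs => rw [hdec]
      rw [List.count_append, List.count_append, hzA, hzC,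
        List.count_eq_length.mpr hallB]
      omega
    have hNB : N ≤ B.length := by omega
    have hslen : s.length = A.length + (B.length + C.length) := by
      rw [hdec]; simp
    have hget : ∀ k (hk : k < B.length), s[A.length + k]'(by omega) = v := by
      intro k hk
      have e : s[A.length + k]'(by omega) = (A ++ (B ++ C))[A.length + k]'(by rw [← hdec]; omega) :=
        List.getElem_of_eq hdec _
      rw [e, List.getElem_append_right (by omega)]
      have e2 : A.length + k - A.length = k := by omega
      rw [getElem_idx_congr _ _ _ e2 (by simp; omega), List.getElem_append_left hk]
      exact (hallB _ (List.getElem_mem _)).symm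
    refine ⟨A.length, by omega, ?_⟩
    have g0 : s[A.length]'(by omega) = v := by
      have := hget 0 (by omega)
      rwa [getElem_idx_congr s _ _ (by omega : A.length + 0 = A.length) (by omega)] at this
    have g1 : s[A.length + N - 1]'(by omega) = v := by
      have := hget (N-1) (by omega)
      rwa [getElem_idx_congr s _ _ (by omega : A.length + (N-1) = A.length + N - 1) (by omega)] at this
    rw [g0, g1]

-- ===== VERDICT =====
theorem occurs_n_times_spec : Claim_equal_occurs_n_times := by
  intro list n _
  unfold Spec_occurs_n_times occurs_n_times occurs_n_times_alt
  rw [Bool.eq_iff_iff, occursLoopA_true_iff]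
  simp only [PySem.Dict.getD_empty, zero_add]
  by_cases hn : n < 1
  · rw [if_pos hn]
    simp only [Bool.false_eq_true, iff_false]
    rintro ⟨v, hv, h1, h2⟩
    omega
  · rw [if_neg hn]
    have hn1 : 1 ≤ n := by omega
    set s := PySem.List.sorted list id false with hsdef
    have hperm : s.Perm list := PySem.List.sorted_perm list id false
    have hpw : s.Pairwise (· ≤ ·) := PySem.List.sorted_pairwise list id
    set N := n.toNat with hNdef
    have hnN : (N : Int) = n := by omega
    have hN1 : 1 ≤ N := by omega
    rw [List.any_eq_true]
    have hbridge :
        (∃ i ∈ PySem.List.pyRange 0 ((s.length : Int) - n + 1) 1,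
            (PySem.List.pyGetD s i 0 == PySem.List.pyGetD s (i + n - 1) 0) = true) ↔
          (∃ i : Nat, ∃ h : i + N ≤ s.length,
            s[i]'(by omega) = s[i + N - 1]'(by omega)) := by
      constructor
      · rintro ⟨i, hi, he⟩
        rw [PySem.List.mem_pyRange_one] at hi
        rw [beq_iff_eq] at he
        obtain ⟨hi0, hi1⟩ := hi
        refine ⟨i.toNat, by omega, ?_⟩
        rw [PySem.List.pyGetD_eq_getElem s 0 hi0 (by omega),
          PySem.List.pyGetD_eq_getElem s 0 (by omega) (by omega)] at he
        have e : (i + n - 1).toNat = i.toNat + N - 1 := by omega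
        rwa [getElem_idx_congr s _ _ e (by omega)] at he
      · rintro ⟨i, h, he⟩
        refine ⟨(i : Int), by rw [PySem.List.mem_pyRange_one]; omega, ?_⟩
        rw [beq_iff_eq,
          PySem.List.pyGetD_eq_getElem s 0 (by omega) (by omega),
          PySem.List.pyGetD_eq_getElem s 0 (by omega) (by omega)]
        have e : ((i : Int) + n - 1).toNat = i + N - 1 := by omega
        rw [getElem_idx_congr s _ _ (by omega : ((i : Int)).toNat = i) (by omega),
          getElem_idx_congr s _ _ e (by omega)]
        exact he
    rw [hbridge, sorted_window_iff s hpw N hN1]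
    constructor
    · rintro ⟨v, hv, h1, h2⟩
      refine ⟨v, (hperm.mem_iff).mpr hv, ?_⟩
      rw [hperm.count_eq]
      omega
    · rintro ⟨v, hv, h2⟩
      refine ⟨v, (hperm.mem_iff).mp hv, by omega, ?_⟩
      rw [← hperm.count_eq]
      omega
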